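-- pv_equiv track=rewrite | github.com/whawkins3030/CGM | newSongGen.py | getPossChordTones
-- ===== SOURCE A (Python) =====
-- def getPossChordTones(chordRootNum, diatonic_range):
--     chordTones = []
--     for i in [0, 2, 4, 7, 9, 11, 14]:
--         tone = chordRootNum + i
--         if tone <= diatonic_range:
--             chordTones.append(tone)
--         else:
--             break
--     return chordTones
-- ===== SOURCE B (Python) =====
-- OFFS = [0, 2, 4, 7, 9, 11, 14]
--
--
-- def getPossChordTones(chordRootNum, diatonic_range):
--     # Binary search for the number of chord offsets within range, then slice.
--     t = diatonic_range - chordRootNum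
--     lo, hi = 0, len(OFFS)
--     while lo < hi:
--         mid = (lo + hi) // 2
--         if OFFS[mid] <= t:
--             lo = mid + 1
--         else:
--             hi = mid
--     return [chordRootNum + o for o in OFFS[:lo]]
-- ===== Notes on version B (the rewrite author's own statement) =====
-- stated objective: alternative
-- what changed: Replaced the scan-until-break over the offset list with a binary search (bisect_right by hand) for the cutoff count followed by a prefix slice + comprehension, exploiting that the offsets are strictly increasing.
import Mathlib
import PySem

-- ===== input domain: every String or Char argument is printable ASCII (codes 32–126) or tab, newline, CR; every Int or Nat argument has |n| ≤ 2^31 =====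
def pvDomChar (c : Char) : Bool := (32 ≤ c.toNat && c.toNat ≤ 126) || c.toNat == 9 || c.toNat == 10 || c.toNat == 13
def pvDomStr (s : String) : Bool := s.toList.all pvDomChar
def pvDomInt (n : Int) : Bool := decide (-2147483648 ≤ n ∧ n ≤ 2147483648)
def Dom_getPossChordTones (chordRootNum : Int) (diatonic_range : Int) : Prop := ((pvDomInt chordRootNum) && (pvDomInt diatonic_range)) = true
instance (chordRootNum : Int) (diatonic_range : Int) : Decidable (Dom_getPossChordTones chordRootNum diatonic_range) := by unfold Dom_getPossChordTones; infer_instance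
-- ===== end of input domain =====

-- B replaces A's scan-until-break with a hand-written bisect_right on the constant
-- sorted offset list plus a prefix slice; alternative decomposition, same result.

-- ===== PORT A =====
def pvChordLoop (chordRootNum diatonic_range : Int) (acc : List Int) : List Int → List Int
  | [] => acc
  | i :: rest =>
    let tone := chordRootNum + i
    if tone ≤ diatonic_range then pvChordLoop chordRootNum diatonic_range (acc ++ [tone]) rest
    else acc

def getPossChordTones (chordRootNum : Int) (diatonic_range : Int) : List Int :=
  pvChordLoop chordRootNum diatonic_range [] [0, 2, 4, 7, 9, 11, 14]

-- ===== PORT B =====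
def pvOFFS : List Int := [0, 2, 4, 7, 9, 11, 14]

-- the while-loop of Source B, fuel = hi - lo (strictly decreases each iteration)
def pvBisect (t : Int) (lo hi : Nat) : Nat → Nat
  | 0 => lo
  | fuel + 1 =>
    if lo < hi then
      let mid := (lo + hi) / 2
      if pvOFFS.getD mid 0 ≤ t then pvBisect t (mid + 1) hi fuel
      else pvBisect t lo mid fuel
    else lo

def getPossChordTones_alt (chordRootNum : Int) (diatonic_range : Int) : List Int :=
  let t := diatonic_range - chordRootNum
  let lo := pvBisect t 0 pvOFFS.length pvOFFS.length
  (pvOFFS.take lo).map (fun o => chordRootNum + o)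

-- ===== PRECONDITION & SPEC =====
def Spec_getPossChordTones (chordRootNum : Int) (diatonic_range : Int) (out : List Int) : Prop := out = getPossChordTones_alt chordRootNum diatonic_range
instance (chordRootNum : Int) (diatonic_range : Int) (out : List Int) : Decidable (Spec_getPossChordTones chordRootNum diatonic_range out) := by unfold Spec_getPossChordTones; infer_instance

-- ===== CLAIM (what is proved, stated in full; the proofs are below) =====
def Claim_equal_getPossChordTones : Prop := ∀ (chordRootNum : Int) (diatonic_range : Int), Dom_getPossChordTones chordRootNum diatonic_range → Spec_getPossChordTones chordRootNum diatonic_range (getPossChordTones chordRootNum diatonic_range)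

-- ===== LEMMAS AND PROOFS =====

-- ===== VERDICT (by name: the statement is the Claim_ definition above) =====
theorem getPossChordTones_spec : Claim_equal_getPossChordTones := by
  intro r d _
  unfold Spec_getPossChordTones getPossChordTones getPossChordTones_alt
  simp only [pvChordLoop, pvBisect, pvOFFS, List.getD, List.length]
  norm_num
  split_ifs <;> simp_all <;> omega
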